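-- pv_equiv track=rewrite | github.com/cussonspoon/All_Python_HW_ | Hw/Hw12/Hw12_66010988_Cusson.py | textese
-- ===== SOURCE A (Python) =====
-- def textese(text):
--     dict1 = {
--         "be" : "b",
--         "because" : "cuz",
--         "see" : "c",
--         "the" : "da",
--         "okay" : "ok",
--         "are" : "r",
--         "you" : "u",
--         "without" : "w/o",
--         "why" : "y",
--         "ate" : "8",
--         "great" : "gr8",
--         "mate" : "m8",
--         "wait" : "w8",
--         "later" : "l8r",
--         "tomorrow" : "2mro",
--         "for" : "4",
--         "before" : "b4",
--         "once" : "1ce",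
--         "and" : "&",
--         "Your" : "ur",
--         "your" : "ur",
--         "Your're" : "ur",
--         "your're" : "ur",
--         "see you" : "cu",
--         "At the moment" : "atm",
--         "Be right back" : "brb",
--         "By the way" : "btw",
--         "For your information" : "FYI",
--         "In my opinion" : "imo",
--         "Oh my god" : "omg",
--         "Laughing out loud": "lol",
--         "As soon as possible" : "ASAP",
--         "In my humble opinion" : "imho",
--         "Talk to you later" : "ttyl",
--         "As far as I know" : "afaik",
--         "Rolling on the floor laughing" : "rofl"
--
--     }
--     words = text.split()
--     result = []
--     i = 0
--     while i < len(words):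
--         for j in range(len(words), i, -1):
--             joined_words = ' '.join(words[i:j])
--             replacement = dict1.get(joined_words, None)
--             if replacement:
--                 result.append(replacement)
--                 i = j
--                 break
--         else:
--             result.append(words[i])
--             i += 1
--
--     return ' '.join(result)
-- ===== SOURCE B (Python) =====
-- _DICT1 = {
--     "be": "b", "because": "cuz", "see": "c", "the": "da", "okay": "ok",
--     "are": "r", "you": "u", "without": "w/o", "why": "y", "ate": "8",
--     "great": "gr8", "mate": "m8", "wait": "w8", "later": "l8r",
--     "tomorrow": "2mro", "for": "4", "before": "b4", "once": "1ce",
--     "and": "&", "Your": "ur", "your": "ur", "Your're": "ur",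
--     "your're": "ur", "see you": "cu", "At the moment": "atm",
--     "Be right back": "brb", "By the way": "btw",
--     "For your information": "FYI", "In my opinion": "imo",
--     "Oh my god": "omg", "Laughing out loud": "lol",
--     "As soon as possible": "ASAP", "In my humble opinion": "imho",
--     "Talk to you later": "ttyl", "As far as I know": "afaik",
--     "Rolling on the floor laughing": "rofl",
-- }
--
-- # The candidate phrases, longest (most words) first: at each position the first
-- # phrase in this list that is a prefix of the remaining words is the longest match.
-- _PHRASES = sorted(_DICT1.items(), key=lambda kv: -kv[0].count(' '))
--
--
-- def textese(text):
--     def go(rest):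
--         if not rest:
--             return []
--         for key, rep in _PHRASES:
--             kw = key.split()
--             if ' '.join(rest[:len(kw)]) == key:
--                 return [rep] + go(rest[len(kw):])
--         return [rest[0]] + go(rest[1:])
--     return ' '.join(go(text.split()))
-- ===== Notes on version B (the rewrite author's own statement) =====
-- stated objective: faster
-- what changed: A tries every suffix end j from len(words) down to i+1 at each position (joining up to the whole remaining sentence for each dict lookup); B precompiles the dictionary once into a phrase list sorted longest-first and, recursing on the remaining word list, takes the first phrase that is a prefix of it, so the per-position work is a constant-size scan instead of linear in the remaining sentence.
import Mathlib
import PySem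

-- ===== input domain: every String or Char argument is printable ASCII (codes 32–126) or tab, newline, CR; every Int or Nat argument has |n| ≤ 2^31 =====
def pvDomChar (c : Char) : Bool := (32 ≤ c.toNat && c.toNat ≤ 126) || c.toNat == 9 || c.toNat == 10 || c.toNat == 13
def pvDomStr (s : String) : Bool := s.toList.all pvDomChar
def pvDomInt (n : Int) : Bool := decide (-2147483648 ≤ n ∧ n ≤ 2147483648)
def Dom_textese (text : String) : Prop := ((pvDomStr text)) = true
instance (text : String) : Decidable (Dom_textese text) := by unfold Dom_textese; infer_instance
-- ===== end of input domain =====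

set_option maxRecDepth 8192


-- B precompiles the dictionary once into a phrase list sorted longest-first and, recursing on
-- the remaining word list, takes the first phrase that is a prefix of it, replacing A's
-- per-position scan over every suffix end of the sentence; objective: faster.

-- ===== PORT A =====

-- the literal dict1 of A (B's Python builds the same literal dictionary as its _DICT1)
def pvDict1 : PySem.Dict String String := PySem.Dict.ofList [
  ("be", "b"), ("because", "cuz"), ("see", "c"), ("the", "da"), ("okay", "ok"),
  ("are", "r"), ("you", "u"), ("without", "w/o"), ("why", "y"), ("ate", "8"),
  ("great", "gr8"), ("mate", "m8"), ("wait", "w8"), ("later", "l8r"),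
  ("tomorrow", "2mro"), ("for", "4"), ("before", "b4"), ("once", "1ce"),
  ("and", "&"), ("Your", "ur"), ("your", "ur"), ("Your're", "ur"),
  ("your're", "ur"), ("see you", "cu"), ("At the moment", "atm"),
  ("Be right back", "brb"), ("By the way", "btw"),
  ("For your information", "FYI"), ("In my opinion", "imo"),
  ("Oh my god", "omg"), ("Laughing out loud", "lol"),
  ("As soon as possible", "ASAP"), ("In my humble opinion", "imho"),
  ("Talk to you later", "ttyl"), ("As far as I know", "afaik"),
  ("Rolling on the floor laughing", "rofl")]

-- A's inner 'for j in range(len(words), i, -1): … if replacement: … break' (no value of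
-- dict1 is "" or None, so Python's 'if replacement:' is exactly 'the lookup succeeded')
def pvInnerA (words : List String) (i : Int) : List Int → Option (String × Int)
  | [] => none
  | j :: rest =>
      match pvDict1.get? (PySem.Str.join " " (PySem.List.slice words (some i) (some j))) with
      | some rep => some (rep, j)
      | none => pvInnerA words i rest

-- termination helper for A's while loop: the j the inner loop breaks at lies in its range
theorem pvInnerA_mem (words : List String) (i : Int) (js : List Int) (r : String) (j : Int)
    (h : pvInnerA words i js = some (r, j)) : j ∈ js := by
  induction js with
  | nil => simp [pvInnerA] at h
  | cons a rest ih =>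
      simp only [pvInnerA] at h
      cases hg : pvDict1.get? (PySem.Str.join " " (PySem.List.slice words (some i) (some a))) with
      | some rep => rw [hg] at h; simp_all
      | none => rw [hg] at h; exact List.mem_cons_of_mem _ (ih h)

-- A's 'while i < len(words)' loop carrying (i, result)
def pvLoopA (words : List String) (i : Nat) (result : List String) : List String :=
  if h : i < words.length then
    match hm : pvInnerA words i (PySem.List.pyRange words.length i (-1)) with
    | some (rep, j) => pvLoopA words j.toNat (result ++ [rep])
    | none => pvLoopA words (i + 1) (result ++ [words[i]])
  else result
termination_by words.length - i
decreasing_by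
  · have hj := pvInnerA_mem words i _ rep j hm
    rw [PySem.List.mem_pyRange_neg_one] at hj
    omega
  · omega

def textese (text : String) : String :=
  PySem.Str.join " " (pvLoopA (PySem.Str.split₀ text) 0 [])

-- ===== PORT B =====

-- B's _PHRASES = sorted(_DICT1.items(), key=lambda kv: -kv[0].count(' '))
def pvPhrases : List (String × String) :=
  PySem.List.sorted pvDict1.items (fun kv => -((PySem.Str.count kv.1 " " : Nat) : Int))

-- B's 'for key, rep in _PHRASES: kw = key.split(); if " ".join(rest[:len(kw)]) == key: …'
def pvScan (rest : List String) : List (String × String) → Option (String × Nat)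
  | [] => none
  | (key, rep) :: ps =>
      let kw := PySem.Str.split₀ key
      if PySem.Str.join " " (rest.take kw.length) == key then some (rep, kw.length)
      else pvScan rest ps

-- termination helpers for B's recursion: a matched phrase consumes at least one word
theorem pvScan_pos (rest : List String) (ps : List (String × String))
    (hps : ∀ kv ∈ ps, 1 ≤ (PySem.Str.split₀ kv.1).length) (r : String) (L : Nat)
    (h : pvScan rest ps = some (r, L)) : 1 ≤ L := by
  induction ps with
  | nil => simp [pvScan] at h
  | cons kv ps ih =>
      obtain ⟨key, rep⟩ := kv
      simp only [pvScan] at h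
      split at h
      · simp only [Option.some.injEq, Prod.mk.injEq] at h
        have h1 : 1 ≤ (PySem.Str.split₀ key).length := hps (key, rep) List.mem_cons_self
        omega
      · exact ih (fun kv hkv => hps kv (List.mem_cons_of_mem _ hkv)) h

theorem pvPhrases_wc : ∀ kv ∈ pvPhrases, 1 ≤ (PySem.Str.split₀ kv.1).length := by decide

-- B's recursive go over the remaining word list
def pvGo : List String → List String
  | [] => []
  | w :: rs =>
      match hm : pvScan (w :: rs) pvPhrases with
      | some (rep, L) => rep :: pvGo ((w :: rs).drop L)
      | none => w :: pvGo rs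
termination_by rest => rest.length
decreasing_by
  · have hL := pvScan_pos (w :: rs) pvPhrases pvPhrases_wc rep L hm
    simp only [List.length_drop, List.length_cons]
    omega
  · simp

def textese_alt (text : String) : String :=
  PySem.Str.join " " (pvGo (PySem.Str.split₀ text))

-- ===== PRECONDITION & SPEC =====
def Spec_textese (text : String) (out : String) : Prop := out = textese_alt text
instance (text : String) (out : String) : Decidable (Spec_textese text out) := by unfold Spec_textese; infer_instance

-- ===== CLAIM (what is proved, stated in full; the proofs are below) =====
def Claim_equal_textese : Prop := ∀ (text : String), Dom_textese text → Spec_textese text (textese text)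

-- ===== LEMMAS AND PROOFS =====

-- the words A and B operate on contain no space character (they come from text.split())
def pvClean (ws : List String) : Prop := ∀ w ∈ ws, ' ' ∉ w.toList

theorem pvSplitGoClean (s : List Char) : ∀ (cur : List Char) (acc : List (List Char)),
    ' ' ∉ cur → (∀ w ∈ acc, ' ' ∉ w) → ∀ w ∈ PySem.Chars.split₀.go s cur acc, ' ' ∉ w := by
  induction s with
  | nil =>
      intro cur acc hc ha w hw
      simp only [PySem.Chars.split₀.go] at hw
      split at hw
      · exact ha w (List.mem_reverse.mp hw)
      · rcases List.mem_cons.mp (List.mem_reverse.mp hw) with h | h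
        · subst h; simpa using hc
        · exact ha w h
  | cons c rest ih =>
      intro cur acc hc ha w hw
      simp only [PySem.Chars.split₀.go] at hw
      split at hw
      · split at hw
        · exact ih [] acc (by simp) ha w hw
        · refine ih [] (cur.reverse :: acc) (by simp) ?_ w hw
          intro v hv
          rcases List.mem_cons.mp hv with h | h
          · subst h; simpa using hc
          · exact ha v h
      · refine ih (c :: cur) acc ?_ ha w hw
        intro hmem
        rcases List.mem_cons.mp hmem with h | h
        · rename_i hsp; rw [← h] at hsp; simp [show PySem.Chars.isspace ' ' = true from rfl] at hsp
        · exact hc h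

theorem pvSplitClean (s : String) : pvClean (PySem.Str.split₀ s) := by
  intro w hw
  have hmem : w.toList ∈ (PySem.Str.split₀ s).map String.toList := List.mem_map_of_mem hw
  rw [PySem.Str.split₀_map_toList] at hmem
  exact pvSplitGoClean s.toList [] [] (by simp) (by simp) w.toList hmem

theorem pvCleanDrop (ws : List String) (h : pvClean ws) (i : Nat) : pvClean (ws.drop i) :=
  fun w hw => h w (List.mem_of_mem_drop hw)

theorem pvCleanTake (ws : List String) (h : pvClean ws) (i : Nat) : pvClean (ws.take i) :=
  fun w hw => h w (List.mem_of_mem_take hw)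

-- a ' '-join of m parts contains at least m-1 spaces …
theorem pvJoin_count (parts : List (List Char)) :
    parts.length - 1 ≤ (PySem.Chars.join [' '] parts).count ' ' := by
  induction parts with
  | nil => simp [PySem.Chars.join]
  | cons a t ih =>
      cases t with
      | nil => simp
      | cons b t' =>
          rw [PySem.Chars.join_cons_cons]
          simp only [List.count_append, List.length_cons] at *
          have hone : List.count ' ' [' '] = 1 := rfl
          omega

-- … and exactly m-1 when the parts themselves are space-free
theorem pvJoin_count_exact (parts : List (List Char)) (h : ∀ p ∈ parts, ' ' ∉ p) :
    (PySem.Chars.join [' '] parts).count ' ' = parts.length - 1 := by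
  induction parts with
  | nil => rw [PySem.Chars.join_nil]; rfl
  | cons a t ih =>
      cases t with
      | nil =>
          rw [PySem.Chars.join_singleton, List.count_eq_zero.mpr (h a List.mem_cons_self)]
          rfl
      | cons b t' =>
          rw [PySem.Chars.join_cons_cons]
          simp only [List.count_append, List.length_cons] at *
          rw [List.count_eq_zero.mpr (h a List.mem_cons_self),
              ih (fun p hp => h p (List.mem_cons_of_mem _ hp))]
          have hone : List.count ' ' [' '] = 1 := rfl
          omega

-- a join of six or more words is never a key of dict1
theorem pvLookup_none (parts : List String) (h : 6 ≤ parts.length) :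
    pvDict1.get? (PySem.Str.join " " parts) = none := by
  rw [PySem.Dict.get?_eq_none_iff_not_mem_keys]
  intro hmem
  have h1 : ∀ k ∈ pvDict1.keys, k.toList.count ' ' ≤ 4 := by decide
  have h1 := h1 _ hmem
  rw [PySem.Str.toList_join] at h1
  have h2 := pvJoin_count (parts.map String.toList)
  simp only [List.length_map] at h2
  have : (" ".toList) = [' '] := rfl
  rw [this] at h1
  omega

-- the dictionary items grouped by word count, in dict order within each group
def pvG1 : List (String × String) := [
  ("be", "b"), ("because", "cuz"), ("see", "c"), ("the", "da"), ("okay", "ok"),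
  ("are", "r"), ("you", "u"), ("without", "w/o"), ("why", "y"), ("ate", "8"),
  ("great", "gr8"), ("mate", "m8"), ("wait", "w8"), ("later", "l8r"),
  ("tomorrow", "2mro"), ("for", "4"), ("before", "b4"), ("once", "1ce"),
  ("and", "&"), ("Your", "ur"), ("your", "ur"), ("Your're", "ur"), ("your're", "ur")]
def pvG2 : List (String × String) := [("see you", "cu")]
def pvG3 : List (String × String) := [
  ("At the moment", "atm"), ("Be right back", "brb"), ("By the way", "btw"),
  ("For your information", "FYI"), ("In my opinion", "imo"),
  ("Oh my god", "omg"), ("Laughing out loud", "lol")]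
def pvG4 : List (String × String) := [
  ("As soon as possible", "ASAP"), ("In my humble opinion", "imho"), ("Talk to you later", "ttyl")]
def pvG5 : List (String × String) := [
  ("As far as I know", "afaik"), ("Rolling on the floor laughing", "rofl")]

def pvGroup : Nat → List (String × String)
  | 1 => pvG1 | 2 => pvG2 | 3 => pvG3 | 4 => pvG4 | 5 => pvG5 | _ => []

theorem pvItems_eq : pvDict1.items = pvGroup 1 ++ pvGroup 2 ++ pvGroup 3 ++ pvGroup 4 ++ pvGroup 5 := by
  decide

theorem pvPhrases_eq : pvPhrases = pvGroup 5 ++ (pvGroup 4 ++ (pvGroup 3 ++ (pvGroup 2 ++ (pvGroup 1 ++ [])))) := by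
  decide

theorem pvGroup_facts : ∀ L, L ≤ 5 → ∀ kv ∈ pvGroup L,
    kv.1.toList.count ' ' + 1 = L ∧ kv.1.toList ≠ [] ∧ (PySem.Str.split₀ kv.1).length = L := by
  intro L hL
  interval_cases L <;> decide

-- the lookup A makes at width L, restricted to the group of L-word keys
def pvFB (rest : List String) (L : Nat) : Option String :=
  Option.map (·.2) (List.find? (fun kv => kv.1 == PySem.Str.join " " (rest.take L)) (pvGroup L))

-- the common shape of both searches: widths 5, 4, …, 1, each consulting only its own group
def pvChain (rest : List String) : Nat → Option (String × Nat)
  | 0 => none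
  | L + 1 =>
      match pvFB rest (L + 1) with
      | some v => some (v, L + 1)
      | none => pvChain rest L

-- A's (proof-side) view of its inner loop: a countdown of window widths
def pvWidth (rest : List String) : Nat → Option (String × Nat)
  | 0 => none
  | L + 1 =>
      match pvDict1.get? (PySem.Str.join " " (rest.take (L + 1))) with
      | some rep => some (rep, L + 1)
      | none => pvWidth rest L

-- the joined window of width L has exactly L-1 spaces, so keys of other groups never equal it
theorem pvFind_group_none (rest : List String) (hclean : pvClean rest) (L M : Nat)
    (hL1 : 1 ≤ L) (hLlen : L ≤ rest.length) (hM : M ≤ 5) (hne : M ≠ L) :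
    List.find? (fun kv => kv.1 == PySem.Str.join " " (rest.take L)) (pvGroup M) = none := by
  rw [List.find?_eq_none]
  intro kv hkv
  simp only [beq_iff_eq]
  intro heq
  have hfacts := pvGroup_facts M hM kv hkv
  have hcount : (PySem.Str.join " " (rest.take L)).toList.count ' ' = L - 1 := by
    rw [PySem.Str.toList_join, show (" ".toList) = [' '] from rfl]
    rw [pvJoin_count_exact _ (by
      intro p hp
      rcases List.mem_map.mp hp with ⟨w, hw, rfl⟩
      exact pvCleanTake rest hclean L w hw)]
    simp only [List.length_map, List.length_take]
    omega
  rw [heq] at hfacts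
  omega

-- when the window is shorter than L (i.e. the whole rest), group L never matches either
theorem pvFB_none (rest : List String) (hclean : pvClean rest) (L : Nat)
    (hL1 : 1 ≤ L) (hL5 : L ≤ 5) (hlen : rest.length < L) : pvFB rest L = none := by
  unfold pvFB
  have hnone : List.find? (fun kv => kv.1 == PySem.Str.join " " (rest.take L)) (pvGroup L) = none := by
    rw [List.find?_eq_none]
    intro kv hkv
    simp only [beq_iff_eq]
    intro heq
    have hfacts := pvGroup_facts L hL5 kv hkv
    have htake : rest.take L = rest := List.take_of_length_le (by omega)
    rcases Nat.eq_zero_or_pos rest.length with h0 | hpos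
    · have hnil : rest = [] := List.eq_nil_of_length_eq_zero h0
      subst hnil
      rw [List.take_nil] at heq
      have : kv.1.toList = [] := by rw [heq]; decide
      exact hfacts.2.1 this
    · have hcount : (PySem.Str.join " " (rest.take L)).toList.count ' ' = rest.length - 1 := by
        rw [PySem.Str.toList_join, show (" ".toList) = [' '] from rfl, htake]
        rw [pvJoin_count_exact _ (by
          intro p hp
          rcases List.mem_map.mp hp with ⟨w, hw, rfl⟩
          exact hclean w hw)]
        simp
      rw [heq] at hfacts
      omega
  rw [hnone]
  rfl

-- A's dictionary lookup at width L equals the lookup restricted to the L-word group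
theorem pvGet_eq_fB (rest : List String) (hclean : pvClean rest) (L : Nat)
    (hL1 : 1 ≤ L) (hL5 : L ≤ 5) (hLlen : L ≤ rest.length) :
    pvDict1.get? (PySem.Str.join " " (rest.take L)) = pvFB rest L := by
  unfold PySem.Dict.get? pvFB
  rw [pvItems_eq]
  congr 1
  rw [List.append_assoc, List.append_assoc, List.append_assoc]
  rw [List.find?_append, List.find?_append, List.find?_append, List.find?_append]
  have hnone : ∀ M, M ≤ 5 → M ≠ L →
      List.find? (fun kv => kv.1 == PySem.Str.join " " (rest.take L)) (pvGroup M) = none :=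
    fun M hM hne => pvFind_group_none rest hclean L M hL1 hLlen hM hne
  interval_cases L
  · rw [hnone 2 (by omega) (by omega), hnone 3 (by omega) (by omega),
        hnone 4 (by omega) (by omega), hnone 5 (by omega) (by omega)]
    cases h : List.find? (fun kv => kv.1 == PySem.Str.join " " (rest.take 1)) (pvGroup 1) <;>
      simp [h, Option.or]
  · rw [hnone 1 (by omega) (by omega), hnone 3 (by omega) (by omega),
        hnone 4 (by omega) (by omega), hnone 5 (by omega) (by omega)]
    cases h : List.find? (fun kv => kv.1 == PySem.Str.join " " (rest.take 2)) (pvGroup 2) <;>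
      simp [h, Option.or]
  · rw [hnone 1 (by omega) (by omega), hnone 2 (by omega) (by omega),
        hnone 4 (by omega) (by omega), hnone 5 (by omega) (by omega)]
    cases h : List.find? (fun kv => kv.1 == PySem.Str.join " " (rest.take 3)) (pvGroup 3) <;>
      simp [h, Option.or]
  · rw [hnone 1 (by omega) (by omega), hnone 2 (by omega) (by omega),
        hnone 3 (by omega) (by omega), hnone 5 (by omega) (by omega)]
    cases h : List.find? (fun kv => kv.1 == PySem.Str.join " " (rest.take 4)) (pvGroup 4) <;>
      simp [h, Option.or]
  · rw [hnone 1 (by omega) (by omega), hnone 2 (by omega) (by omega),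
        hnone 3 (by omega) (by omega), hnone 4 (by omega) (by omega)]
    cases h : List.find? (fun kv => kv.1 == PySem.Str.join " " (rest.take 5)) (pvGroup 5) <;>
      simp [h, Option.or]

-- B's scan over one length-homogeneous group is the group lookup
theorem pvScan_group (rest : List String) (L : Nat) :
    ∀ (G ps : List (String × String)), (∀ kv ∈ G, (PySem.Str.split₀ kv.1).length = L) →
    pvScan rest (G ++ ps) =
      match Option.map (·.2) (List.find? (fun kv => kv.1 == PySem.Str.join " " (rest.take L)) G) with
      | some v => some (v, L)
      | none => pvScan rest ps := by
  intro G
  induction G with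
  | nil => intro ps _; simp [List.find?]
  | cons kv G ih =>
      intro ps hG
      obtain ⟨key, rep⟩ := kv
      have hlen : (PySem.Str.split₀ key).length = L := hG (key, rep) List.mem_cons_self
      by_cases hb : key = PySem.Str.join " " (rest.take L)
      · have h2 : (PySem.Str.join " " (rest.take L) == key) = true := by simp [hb]
        simp only [List.cons_append, pvScan, hlen, h2, if_true]
        rw [List.find?_cons_of_pos (by simp [hb])]
        simp
      · have h2 : (PySem.Str.join " " (rest.take L) == key) = false := by
          simp [Ne.symm hb]
        simp only [List.cons_append, pvScan, hlen, h2, Bool.false_eq_true, if_false]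
        rw [List.find?_cons_of_neg (by simp [hb]),
            ih ps (fun kv hkv => hG kv (List.mem_cons_of_mem _ hkv))]

-- B's scan over the sorted phrase list is the width-5 chain
theorem pvScan_chain (rest : List String) : pvScan rest pvPhrases = pvChain rest 5 := by
  rw [pvPhrases_eq]
  rw [pvScan_group rest 5 _ _ (fun kv hkv => (pvGroup_facts 5 (by omega) kv hkv).2.2)]
  rw [pvScan_group rest 4 _ _ (fun kv hkv => (pvGroup_facts 4 (by omega) kv hkv).2.2)]
  rw [pvScan_group rest 3 _ _ (fun kv hkv => (pvGroup_facts 3 (by omega) kv hkv).2.2)]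
  rw [pvScan_group rest 2 _ _ (fun kv hkv => (pvGroup_facts 2 (by omega) kv hkv).2.2)]
  rw [pvScan_group rest 1 _ _ (fun kv hkv => (pvGroup_facts 1 (by omega) kv hkv).2.2)]
  simp only [pvChain, pvFB, pvScan]

-- A's width countdown (cut off at the sentence end) is the same chain
theorem pvWidth_chain (rest : List String) (hclean : pvClean rest) :
    ∀ k, k ≤ 5 → pvWidth rest (min k rest.length) = pvChain rest k := by
  intro k
  induction k with
  | zero => intro _; simp [pvWidth, pvChain]
  | succ k ih =>
      intro hk5
      by_cases h : k + 1 ≤ rest.length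
      · rw [Nat.min_eq_left h]
        simp only [pvWidth, pvChain]
        rw [pvGet_eq_fB rest hclean (k + 1) (by omega) hk5 h]
        cases hfb : pvFB rest (k + 1) with
        | some v => simp
        | none =>
            simp only []
            have hik := ih (by omega)
            rwa [Nat.min_eq_left (by omega)] at hik
      · rw [Nat.min_eq_right (by omega)]
        simp only [pvChain]
        rw [pvFB_none rest hclean (k + 1) (by omega) hk5 (by omega)]
        simp only []
        have hik := ih (by omega)
        rwa [Nat.min_eq_right (by omega)] at hik

-- A's inner countdown of end indices j = i+L, …, i+1 is the countdown of widths L, …, 1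
theorem pvInner_eq (words : List String) (L : Nat) : ∀ (i : Nat),
    pvInnerA words i (PySem.List.pyRange (i + L) i (-1)) =
      (pvWidth (words.drop i) L).map (fun p => (p.1, ((i + p.2 : Nat) : Int))) := by
  induction L with
  | zero =>
      intro i
      rw [PySem.List.pyRange_neg_one_eq_nil (by omega)]
      simp [pvInnerA, pvWidth]
  | succ L ih =>
      intro i
      rw [PySem.List.pyRange_neg_one_cons (by push_cast; omega)]
      rw [show ((i : Int) + ((L + 1 : Nat) : Int)) = ((i + (L + 1) : Nat) : Int) by push_cast; ring]
      simp only [pvInnerA]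
      rw [show ((i + (L + 1) : Nat) : Int) - 1 = ((i : Int) + L) by push_cast; ring]
      rw [show ((i : Int)) = ((i : Nat) : Int) from rfl,
          PySem.List.slice_natCast words i (i + (L + 1))]
      rw [show i + (L + 1) - i = L + 1 by omega]
      simp only [pvWidth]
      cases hg : pvDict1.get? (PySem.Str.join " " ((words.drop i).take (L + 1))) with
      | some rep => simp
      | none => simpa using ih i

-- A's inner loop skips every j beyond i+5 (windows of ≥ 6 words never match)
theorem pvInnerA_skip (words : List String) (i : Nat) (js rest : List Int)
    (hjs : ∀ j ∈ js, (i : Int) + 5 < j ∧ j ≤ words.length) :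
    pvInnerA words i (js ++ rest) = pvInnerA words i rest := by
  induction js with
  | nil => simp
  | cons j t ih =>
      have hj := hjs j (List.mem_cons_self)
      have hnone : pvDict1.get? (PySem.Str.join " " (PySem.List.slice words (some i) (some j))) = none := by
        apply pvLookup_none
        rw [show (j : Int) = ((j.toNat : Nat) : Int) by omega,
            show ((i : Int)) = ((i : Nat) : Int) from rfl,
            PySem.List.slice_natCast words i j.toNat]
        simp only [List.length_take, List.length_drop]
        omega
      simp only [List.cons_append, pvInnerA, hnone]
      exact ih (fun x hx => hjs x (List.mem_cons_of_mem _ hx))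

-- A's full inner loop equals B's scan at position i
theorem pvInner_scan (words : List String) (hclean : pvClean words) (i : Nat)
    (h : i < words.length) :
    pvInnerA words i (PySem.List.pyRange words.length i (-1)) =
      (pvScan (words.drop i) pvPhrases).map (fun p => (p.1, ((i + p.2 : Nat) : Int))) := by
  have hcleand := pvCleanDrop words hclean i
  have hlen : (words.drop i).length = words.length - i := by simp
  have key : pvInnerA words i (PySem.List.pyRange words.length i (-1)) =
      (pvWidth (words.drop i) (min 5 (words.length - i))).map
        (fun p => (p.1, ((i + p.2 : Nat) : Int))) := by
    by_cases hle : words.length - i ≤ 5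
    · rw [show ((words.length : Int)) = ((i : Int) + (words.length - i : Nat)) by omega]
      rw [pvInner_eq]
      rw [show min 5 (words.length - i) = words.length - i by omega]
    · have hsplit : PySem.List.pyRange words.length i (-1) =
          PySem.List.pyRange words.length ((i : Int) + 5) (-1) ++
            PySem.List.pyRange ((i : Int) + 5) i (-1) := by
        rw [PySem.List.pyRange_neg_one_eq_reverse, PySem.List.pyRange_neg_one_eq_reverse,
            PySem.List.pyRange_neg_one_eq_reverse,
            PySem.List.pyRange_one_append ((i : Int) + 1) ((i : Int) + 5 + 1) ((words.length : Int) + 1)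
              (by omega) (by omega)]
        rw [List.reverse_append]
      rw [hsplit, pvInnerA_skip words i _ _ (by
        intro j hj
        rw [PySem.List.mem_pyRange_neg_one] at hj
        exact ⟨hj.1, hj.2⟩)]
      rw [show ((i : Int) + 5) = ((i : Int) + (5 : Nat)) by push_cast; ring, pvInner_eq]
      rw [show min 5 (words.length - i) = 5 by omega]
  rw [key, ← hlen, pvWidth_chain (words.drop i) hcleand 5 (by omega), ← pvScan_chain]

-- the two programs agree position by position
theorem pvLoop_go (words : List String) (hclean : pvClean words) :
    ∀ (n i : Nat) (res : List String), words.length - i ≤ n →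
      pvLoopA words i res = res ++ pvGo (words.drop i) := by
  intro n
  induction n with
  | zero =>
      intro i res hn
      rw [pvLoopA, dif_neg (by omega), List.drop_of_length_le (by omega)]
      simp [pvGo]
  | succ n ih =>
      intro i res hn
      by_cases h : i < words.length
      · have hkey := pvInner_scan words hclean i h
        obtain ⟨w, rs, hw⟩ : ∃ w rs, words.drop i = w :: rs := by
          cases hd : words.drop i with
          | nil => exact absurd (by simpa using congrArg List.length hd) (by omega)
          | cons w rs => exact ⟨w, rs, rfl⟩
        rw [pvLoopA, dif_pos h]
        split
        · rename_i rep j heqA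
          rw [hkey] at heqA
          cases heqB : pvScan (words.drop i) pvPhrases with
          | none => rw [heqB] at heqA; simp at heqA
          | some p =>
              obtain ⟨rep', L⟩ := p
              rw [heqB] at heqA
              simp only [Option.map_some, Option.some.injEq, Prod.mk.injEq] at heqA
              obtain ⟨h1, h2⟩ := heqA
              have hL : 1 ≤ L := pvScan_pos _ _ pvPhrases_wc _ _ heqB
              rw [← h2, Int.toNat_natCast]
              rw [ih (i + L) (res ++ [rep]) (by omega)]
              have hdrop : (w :: rs).drop L = words.drop (i + L) := by
                rw [← hw, List.drop_drop]
              have hgo : pvGo (words.drop i) = rep :: pvGo (words.drop (i + L)) := by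
                rw [hw] at heqB ⊢
                rw [pvGo]
                split
                · rename_i rep2 L2 hm
                  rw [heqB] at hm
                  simp only [Option.some.injEq, Prod.mk.injEq] at hm
                  rw [← hm.1, ← hm.2, hdrop, h1]
                · rename_i hm
                  rw [heqB] at hm
                  simp at hm
              rw [hgo]
              simp
        · rename_i heqA
          rw [hkey] at heqA
          cases heqB : pvScan (words.drop i) pvPhrases with
          | some p => rw [heqB] at heqA; simp at heqA
          | none =>
              rw [ih (i + 1) (res ++ [words[i]]) (by omega)]
              have hgo : pvGo (words.drop i) = w :: pvGo rs := by
                rw [hw] at heqB ⊢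
                rw [pvGo]
                split
                · rename_i rep2 L2 hm
                  rw [heqB] at hm
                  simp at hm
                · rfl
              have hwi : words[i] = w := by
                have : (words.drop i)[0]'(by rw [hw]; simp) = w := by simp [hw]
                rwa [List.getElem_drop] at this
              have hrs : words.drop (i + 1) = rs := by
                have h2 : (words.drop i).drop 1 = rs := by rw [hw]; simp
                rwa [List.drop_drop] at h2
              rw [hrs, hgo, hwi]
              simp
      · rw [pvLoopA, dif_neg h, List.drop_of_length_le (by omega)]
        simp [pvGo]

-- ===== VERDICT (by name: the statement is the Claim_ definition above) =====
theorem textese_spec : Claim_equal_textese := by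
  intro text _
  unfold Spec_textese textese textese_alt
  rw [pvLoop_go (PySem.Str.split₀ text) (pvSplitClean text)
        (PySem.Str.split₀ text).length 0 [] (by omega)]
  simp
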